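-- pv_equiv track=rewrite | github.com/SandraMavsar/AdventOfCode | 2023/Day_18/solution.py | find_area
-- ===== SOURCE A (Python) =====
-- def find_area(instructions):
--     total_perimeter, total_shoelace = 0, 0
--     current_x, current_y, points = 0, 0, [(0, 0)]
--
--     for direction, distance in instructions:
--         delta_x, delta_y = {"R": (1, 0), "L": (-1, 0), "U": (0, -1), "D": (0, 1)}[direction]
--         current_x, current_y = current_x + delta_x * distance, current_y + delta_y * distance
--         points.append((current_x, current_y))
--         total_perimeter += distance
--
--     # Calculate the shoelace formula for the points to determine the area
--     shoelace = sum((a[0] * b[1] - b[0] * a[1]) for a, b in zip(points, points[1:])) // 2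
--
--     # Calculate the total area by adding shoelace, half of the perimeter, and 1
--     total_area = shoelace + total_perimeter // 2 + 1
--     return total_area
-- ===== SOURCE B (Python) =====
-- def find_area(instructions):
--     # Green's theorem specialised to axis-aligned edges: each move contributes
--     # directly to twice the signed area (no points, no vectors, no pair products).
--     x, y, area2, perimeter = 0, 0, 0, 0
--     for direction, distance in instructions:
--         if direction == "R":
--             area2 -= y * distance
--             x += distance
--         elif direction == "L":
--             area2 += y * distance
--             x -= distance
--         elif direction == "U":
--             area2 -= x * distance
--             y -= distance
--         elif direction == "D":
--             area2 += x * distance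
--             y += distance
--         else:
--             raise KeyError(direction)
--         perimeter += distance
--     return area2 // 2 + perimeter // 2 + 1
-- ===== Notes on version B (the rewrite author's own statement) =====
-- stated objective: alternative
-- what changed: Replaces the shoelace-over-vertex-pairs computation (points list + zip cross-products, or any vertex walk) by Green's theorem specialised to axis-aligned moves: each instruction adds its own direct area contribution (-y*d, +y*d, -x*d, +x*d) with no points, no delta vectors and no pair products.
import Mathlib
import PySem

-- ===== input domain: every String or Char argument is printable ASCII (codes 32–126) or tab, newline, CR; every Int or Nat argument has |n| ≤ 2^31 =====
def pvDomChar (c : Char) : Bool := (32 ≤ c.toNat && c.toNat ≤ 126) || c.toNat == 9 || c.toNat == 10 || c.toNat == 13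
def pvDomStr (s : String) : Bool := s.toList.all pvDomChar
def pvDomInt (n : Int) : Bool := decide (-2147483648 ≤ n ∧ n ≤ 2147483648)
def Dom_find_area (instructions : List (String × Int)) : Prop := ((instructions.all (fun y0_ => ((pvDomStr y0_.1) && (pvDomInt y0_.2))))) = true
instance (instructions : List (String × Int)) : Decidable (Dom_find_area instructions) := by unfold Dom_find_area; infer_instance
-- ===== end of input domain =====

-- B replaces the shoelace over vertex pairs by Green's theorem specialised to axis-aligned moves (each instruction contributes its own area term); alternative decomposition, same result.


-- ===== PORT A =====
-- the direction dict {"R":(1,0),"L":(-1,0),"U":(0,-1),"D":(0,1)}; lookup `none` = Python KeyError, excluded by Pre_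
def deltaDict : PySem.Dict String (Int × Int) :=
  PySem.Dict.ofList [("R", ((1:Int), (0:Int))), ("L", (-1, 0)), ("U", (0, -1)), ("D", (0, 1))]

def find_area (instructions : List (String × Int)) : Int :=
  let st := instructions.foldl
    (fun (s : Int × Int × List (Int × Int) × Int) p =>
      let d := (PySem.Dict.get? deltaDict p.1).getD (0, 0)
      let nx := s.1 + d.1 * p.2
      let ny := s.2.1 + d.2 * p.2
      (nx, ny, s.2.2.1 ++ [(nx, ny)], s.2.2.2 + p.2))
    (0, 0, [((0:Int), (0:Int))], 0)
  let points := st.2.2.1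
  let shoelace := PySem.Int.floordiv
    ((List.zip points points.tail).foldl
      (fun acc ab => acc + (ab.1.1 * ab.2.2 - ab.2.1 * ab.1.2)) 0) 2
  shoelace + PySem.Int.floordiv st.2.2.2 2 + 1

-- ===== PORT B =====
-- the `else: raise KeyError` branch (excluded by Pre_) is modelled by leaving the state unchanged
def find_area_alt (instructions : List (String × Int)) : Int :=
  let st := instructions.foldl
    (fun (s : Int × Int × Int × Int) p =>
      if p.1 = "R" then (s.1 + p.2, s.2.1, s.2.2.1 - s.2.1 * p.2, s.2.2.2 + p.2)
      else if p.1 = "L" then (s.1 - p.2, s.2.1, s.2.2.1 + s.2.1 * p.2, s.2.2.2 + p.2)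
      else if p.1 = "U" then (s.1, s.2.1 - p.2, s.2.2.1 - s.1 * p.2, s.2.2.2 + p.2)
      else if p.1 = "D" then (s.1, s.2.1 + p.2, s.2.2.1 + s.1 * p.2, s.2.2.2 + p.2)
      else s)
    ((0:Int), (0:Int), (0:Int), (0:Int))
  PySem.Int.floordiv st.2.2.1 2 + PySem.Int.floordiv st.2.2.2 2 + 1

-- ===== PRECONDITION & SPEC =====
-- Pre_ excludes exactly the inputs where Python A and B raise KeyError: a direction outside R/L/U/D.
def Pre_find_area (instructions : List (String × Int)) : Prop :=
  ∀ p ∈ instructions, p.1 = "R" ∨ p.1 = "L" ∨ p.1 = "U" ∨ p.1 = "D"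
instance (instructions : List (String × Int)) : Decidable (Pre_find_area instructions) := by
  unfold Pre_find_area; infer_instance
def pvWitness_find_area : (List (String × Int)) := [("R", 6), ("D", 5), ("L", 6), ("U", 5)]

def Spec_find_area (instructions : List (String × Int)) (out : Int) : Prop := out = find_area_alt instructions
instance (instructions : List (String × Int)) (out : Int) : Decidable (Spec_find_area instructions out) := by unfold Spec_find_area; infer_instance

-- ===== CLAIM (what is proved, stated in full; the proofs are below) =====
def Claim_equal_find_area : Prop := ∀ (instructions : List (String × Int)), Dom_find_area instructions → Pre_find_area instructions → Spec_find_area instructions (find_area instructions)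

-- ===== LEMMAS AND PROOFS =====

-- proof-side helpers characterising the two folds
def pvDelta (d : String) : Int × Int := (PySem.Dict.get? deltaDict d).getD (0, 0)

def pvEnd (cx cy : Int) : List (String × Int) → Int × Int
  | [] => (cx, cy)
  | p :: rest => pvEnd (cx + (pvDelta p.1).1 * p.2) (cy + (pvDelta p.1).2 * p.2) rest

def pvTrail (cx cy : Int) : List (String × Int) → List (Int × Int)
  | [] => []
  | p :: rest =>
    let nx := cx + (pvDelta p.1).1 * p.2
    let ny := cy + (pvDelta p.1).2 * p.2
    (nx, ny) :: pvTrail nx ny rest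

def pvSumd : List (String × Int) → Int
  | [] => 0
  | p :: rest => p.2 + pvSumd rest

def pvShl (cx cy : Int) : List (String × Int) → Int
  | [] => 0
  | p :: rest =>
    let nx := cx + (pvDelta p.1).1 * p.2
    let ny := cy + (pvDelta p.1).2 * p.2
    (cx * ny - nx * cy) + pvShl nx ny rest

lemma foldA_char (instructions : List (String × Int)) :
    ∀ (cx cy : Int) (pts : List (Int × Int)) (per : Int),
    instructions.foldl
      (fun (s : Int × Int × List (Int × Int) × Int) p =>
        let d := (PySem.Dict.get? deltaDict p.1).getD (0, 0)
        let nx := s.1 + d.1 * p.2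
        let ny := s.2.1 + d.2 * p.2
        (nx, ny, s.2.2.1 ++ [(nx, ny)], s.2.2.2 + p.2))
      (cx, cy, pts, per)
    = ((pvEnd cx cy instructions).1, (pvEnd cx cy instructions).2,
       pts ++ pvTrail cx cy instructions, per + pvSumd instructions) := by
  induction instructions with
  | nil => intro cx cy pts per; simp [pvEnd, pvTrail, pvSumd]
  | cons p rest ih =>
    intro cx cy pts per
    simp only [List.foldl_cons]
    rw [ih]
    simp [pvEnd, pvTrail, pvSumd, pvDelta, List.append_assoc]
    omega

lemma pvDelta_R : pvDelta "R" = (1, 0) := by decide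
lemma pvDelta_L : pvDelta "L" = (-1, 0) := by decide
lemma pvDelta_U : pvDelta "U" = (0, -1) := by decide
lemma pvDelta_D : pvDelta "D" = (0, 1) := by decide

-- B's fold, under Pre_, computes the same end point, the shoelace sum and the perimeter
lemma foldB_char (instructions : List (String × Int)) :
    ∀ (cx cy sh per : Int),
    (∀ p ∈ instructions, p.1 = "R" ∨ p.1 = "L" ∨ p.1 = "U" ∨ p.1 = "D") →
    instructions.foldl
      (fun (s : Int × Int × Int × Int) p =>
        if p.1 = "R" then (s.1 + p.2, s.2.1, s.2.2.1 - s.2.1 * p.2, s.2.2.2 + p.2)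
        else if p.1 = "L" then (s.1 - p.2, s.2.1, s.2.2.1 + s.2.1 * p.2, s.2.2.2 + p.2)
        else if p.1 = "U" then (s.1, s.2.1 - p.2, s.2.2.1 - s.1 * p.2, s.2.2.2 + p.2)
        else if p.1 = "D" then (s.1, s.2.1 + p.2, s.2.2.1 + s.1 * p.2, s.2.2.2 + p.2)
        else s)
      (cx, cy, sh, per)
    = ((pvEnd cx cy instructions).1, (pvEnd cx cy instructions).2,
       sh + pvShl cx cy instructions, per + pvSumd instructions) := by
  induction instructions with
  | nil => intro cx cy sh per _; simp [pvEnd, pvShl, pvSumd]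
  | cons p rest ih =>
    intro cx cy sh per h
    have hrest : ∀ q ∈ rest, q.1 = "R" ∨ q.1 = "L" ∨ q.1 = "U" ∨ q.1 = "D" := by
      intro q hq; exact h q (List.mem_cons_of_mem _ hq)
    simp only [List.foldl_cons]
    rcases h p (List.mem_cons_self) with hp | hp | hp | hp <;>
      rw [hp] <;>
      simp only [reduceIte] <;>
      rw [ih _ _ _ _ hrest] <;>
      simp [pvEnd, pvShl, pvSumd, hp, pvDelta_R, pvDelta_L, pvDelta_U, pvDelta_D] <;>
      and_intros <;> first | trivial | ring

-- shoelace fold with an arbitrary initial accumulator pulls out as addition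
lemma zfold_init (z : List ((Int × Int) × (Int × Int))) :
    ∀ (s : Int),
    z.foldl (fun acc ab => acc + (ab.1.1 * ab.2.2 - ab.2.1 * ab.1.2)) s
    = s + z.foldl (fun acc ab => acc + (ab.1.1 * ab.2.2 - ab.2.1 * ab.1.2)) 0 := by
  induction z with
  | nil => intro s; simp
  | cons ab rest ih =>
    intro s
    simp only [List.foldl_cons]
    rw [ih, ih (0 + _)]
    ring

-- the zip-scan over (cx,cy) :: trail equals pvShl
lemma zsum_trail (instructions : List (String × Int)) :
    ∀ (cx cy : Int),
    (List.zip ((cx, cy) :: pvTrail cx cy instructions) (pvTrail cx cy instructions)).foldl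
      (fun acc ab => acc + (ab.1.1 * ab.2.2 - ab.2.1 * ab.1.2)) 0
    = pvShl cx cy instructions := by
  induction instructions with
  | nil => intro cx cy; simp [pvTrail, pvShl]
  | cons p rest ih =>
    intro cx cy
    simp only [pvTrail, pvShl, List.zip_cons_cons, List.foldl_cons]
    rw [zfold_init, ih]
    ring

-- ===== VERDICT (by name: the statement is the Claim_ definition above) =====
theorem find_area_spec : Claim_equal_find_area := by
  intro instructions _ hpre
  show find_area instructions = find_area_alt instructions
  unfold find_area find_area_alt
  rw [foldA_char, foldB_char instructions 0 0 0 0 hpre]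
  simp only [List.singleton_append, List.tail_cons]
  rw [zsum_trail]
  simp
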